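-- pv_equiv track=rewrite | github.com/goodsosbva/JS_Algorithm-DataStructuer | codingTest/스파르타_작심삼일_챌린지/김밥천국의_계단_28069.py | climb_stair_for_kimbap_heaven
-- ===== SOURCE A (Python) =====
-- import math
--
-- INF = 10**9
--
-- def climb_stair_for_kimbap_heaven(n, k):
--     dp = [INF] * (n + 1)
--     dp[0] = 0
--
--     for i in range(n + 1):
--         if i + 1 <= n:
--             dp[i + 1] = min(dp[i + 1], dp[i] + 1)
--
--         teleportation = i + math.floor(i / 2)
--         if teleportation <= n:
--             dp[teleportation] = min(dp[teleportation], dp[i] + 1)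
--
--     return dp
-- ===== SOURCE B (Python) =====
-- INF = 10**9
--
-- def climb_stair_for_kimbap_heaven(n, k):
--     # Pull-based DP: each dp[i] is computed once from its (at most two)
--     # predecessors i-1 and the unique j with j + j//2 == i (exists iff i % 3 != 2).
--     dp = [0]
--     for i in range(1, n + 1):
--         d = dp[i - 1] + 1
--         if i % 3 != 2:
--             p = 2 * (i // 3) + i % 3
--             if p < i:
--                 d = min(d, dp[p] + 1)
--         dp.append(d)
--     return dp
-- ===== Notes on version B (the rewrite author's own statement) =====
-- stated objective: alternative
-- what changed: Replaces A's scatter/relaxation sweep over a preallocated INF array (each stair pushes min-updates to its two successors) with a pull-based DP that computes each dp[i] exactly once from its two closed-form predecessors (i-1 and the unique j with j + j//2 == i, which exists iff i % 3 != 2) and appends it; no INF sentinel or in-place updates remain.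
import Mathlib
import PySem

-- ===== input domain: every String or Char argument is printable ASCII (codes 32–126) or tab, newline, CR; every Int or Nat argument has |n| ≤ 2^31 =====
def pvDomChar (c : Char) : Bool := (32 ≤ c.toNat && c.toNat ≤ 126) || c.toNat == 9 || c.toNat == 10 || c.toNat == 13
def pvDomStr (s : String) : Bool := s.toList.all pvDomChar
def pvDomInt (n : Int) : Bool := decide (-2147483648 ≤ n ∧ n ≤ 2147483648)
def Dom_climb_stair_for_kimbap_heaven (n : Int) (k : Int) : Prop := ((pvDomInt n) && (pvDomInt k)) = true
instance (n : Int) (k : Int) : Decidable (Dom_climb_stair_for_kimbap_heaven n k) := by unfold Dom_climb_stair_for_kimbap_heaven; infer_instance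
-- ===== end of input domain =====

-- B replaces A's scatter/relaxation sweep over an INF-filled array by a pull-based DP that
-- computes each entry once from its two closed-form predecessors (objective: alternative).

-- ===== PORT A =====
def pvINF : Int := 10 ^ 9

-- one iteration of A's loop body (i is the Python loop variable, n the bound)
def stepA (n : Int) (dp : List Int) (i : Int) : List Int :=
  let dp1 :=
    if i + 1 ≤ n then
      PySem.List.pySetD dp (i + 1)
        (min (PySem.List.pyGetD dp (i + 1) 0) (PySem.List.pyGetD dp i 0 + 1))
    else dp
  -- math.floor(i / 2) = i // 2 exactly for |i| ≤ 2^31 (i / 2 is exactly representable)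
  let teleportation := i + PySem.Int.floordiv i 2
  if teleportation ≤ n then
    PySem.List.pySetD dp1 teleportation
      (min (PySem.List.pyGetD dp1 teleportation 0) (PySem.List.pyGetD dp1 i 0 + 1))
  else dp1

def climb_stair_for_kimbap_heaven (n : Int) (k : Int) : List Int :=
  -- dp = [INF] * (n + 1); dp[0] = 0   (IndexError for n < 0: excluded by Pre_)
  let dp0 := PySem.List.pySetD (List.replicate (n + 1).toNat pvINF) 0 0
  (PySem.List.pyRange 0 (n + 1) 1).foldl (stepA n) dp0

-- ===== PORT B =====
-- one iteration of B's loop body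
def stepB (dp : List Int) (i : Int) : List Int :=
  dp ++
    [if PySem.Int.mod i 3 ≠ 2 then
       -- p = 2 * (i // 3) + i % 3
       if 2 * PySem.Int.floordiv i 3 + PySem.Int.mod i 3 < i then
         min (PySem.List.pyGetD dp (i - 1) 0 + 1)
           (PySem.List.pyGetD dp (2 * PySem.Int.floordiv i 3 + PySem.Int.mod i 3) 0 + 1)
       else PySem.List.pyGetD dp (i - 1) 0 + 1
     else PySem.List.pyGetD dp (i - 1) 0 + 1]

def climb_stair_for_kimbap_heaven_alt (n : Int) (k : Int) : List Int :=
  (PySem.List.pyRange 1 (n + 1) 1).foldl stepB [0]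

-- ===== PRECONDITION & SPEC =====
-- Pre_ excludes exactly n < 0, where A raises IndexError (dp[0] = 0 on an empty list).
def Pre_climb_stair_for_kimbap_heaven (n : Int) (k : Int) : Prop := 0 ≤ n
instance (n : Int) (k : Int) : Decidable (Pre_climb_stair_for_kimbap_heaven n k) := by
  unfold Pre_climb_stair_for_kimbap_heaven; infer_instance

def pvWitness_climb_stair_for_kimbap_heaven : Int × Int := (5, 3)

def Spec_climb_stair_for_kimbap_heaven (n : Int) (k : Int) (out : List Int) : Prop := out = climb_stair_for_kimbap_heaven_alt n k
instance (n : Int) (k : Int) (out : List Int) : Decidable (Spec_climb_stair_for_kimbap_heaven n k out) := by unfold Spec_climb_stair_for_kimbap_heaven; infer_instance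

-- ===== CLAIM (what is proved, stated in full; the proofs are below) =====
def Claim_equal_climb_stair_for_kimbap_heaven : Prop := ∀ (n : Int) (k : Int), Dom_climb_stair_for_kimbap_heaven n k → Pre_climb_stair_for_kimbap_heaven n k → Spec_climb_stair_for_kimbap_heaven n k (climb_stair_for_kimbap_heaven n k)

-- ===== LEMMAS AND PROOFS =====

-- the common value: shortest number of moves to stair t (moves u → u+1 and u → u + u/2)
def Dval : Nat → Int
  | 0 => 0
  | (m + 1) =>
    if h : (m + 1) % 3 ≠ 2 ∧ 2 * ((m + 1) / 3) + (m + 1) % 3 < m + 1 then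
      min (Dval m + 1) (Dval (2 * ((m + 1) / 3) + (m + 1) % 3) + 1)
    else Dval m + 1
  decreasing_by all_goals omega

lemma dval_succ_le (m : Nat) : Dval (m + 1) ≤ Dval m + 1 := by
  rw [Dval]; split
  · exact min_le_left _ _
  · exact le_refl _

lemma dval_le (m : Nat) : Dval m ≤ (m : Int) := by
  induction m with
  | zero => simp [Dval]
  | succ m ih =>
    have := dval_succ_le m
    push_cast
    omega

lemma redstep (t : Nat) (h : 3 ≤ t) : ∃ q, q ≤ 2 * t / 3 + 1 ∧ Dval t ≤ Dval q + 2 := by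
  rcases Nat.exists_eq_add_of_le h with ⟨m, rfl⟩
  by_cases h2 : (3 + m) % 3 = 2
  · -- step back once to 3+m-1, which has residue 1 and a teleport predecessor
    obtain ⟨m', rfl⟩ : ∃ m', m = m' + 2 := ⟨m - 2, by omega⟩
    refine ⟨2 * ((3 + (m' + 2) - 1) / 3) + (3 + (m' + 2) - 1) % 3, by omega, ?_⟩
    have h1 : Dval (3 + (m' + 2)) ≤ Dval (3 + (m' + 1)) + 1 := by
      have : 3 + (m' + 2) = (3 + (m' + 1)) + 1 := by omega
      rw [this]; exact dval_succ_le _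
    have h2' : Dval (3 + (m' + 1)) ≤ Dval (2 * ((3 + (m' + 1)) / 3) + (3 + (m' + 1)) % 3) + 1 := by
      conv_lhs => rw [show 3 + (m' + 1) = (2 + (m' + 1)) + 1 by omega, Dval]
      rw [dif_pos (by omega)]
      have : (2 + (m' + 1)) + 1 = 3 + (m' + 1) := by omega
      rw [this]
      exact min_le_right _ _
    have he : 3 + (m' + 2) - 1 = 3 + (m' + 1) := by omega
    rw [he]
    omega
  · refine ⟨2 * ((3 + m) / 3) + (3 + m) % 3, by omega, ?_⟩
    have : Dval (3 + m) ≤ Dval (2 * ((3 + m) / 3) + (3 + m) % 3) + 1 := by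
      conv_lhs => rw [show 3 + m = (2 + m) + 1 by omega, Dval]
      rw [dif_pos (by omega)]
      have : (2 + m) + 1 = 3 + m := by omega
      rw [this]
      exact min_le_right _ _
    omega

lemma bound_pow : ∀ (j : Nat), ∀ t, t ≤ 48 * 2 ^ j → Dval t ≤ 48 + 4 * (j : Int) := by
  intro j
  induction j with
  | zero =>
    intro t ht
    have := dval_le t
    simp at ht ⊢
    have : (t : Int) ≤ 48 := by exact_mod_cast Nat.cast_le.mpr ht
    omega
  | succ j ih =>
    intro t ht
    by_cases hsm : t ≤ 48 * 2 ^ j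
    · have := ih t hsm
      push_cast at this ⊢
      omega
    · have hM : 48 ≤ 48 * 2 ^ j := Nat.le_mul_of_pos_right _ (by positivity)
      have h3 : 3 ≤ t := by omega
      obtain ⟨q1, hq1, hd1⟩ := redstep t h3
      by_cases hq1M : q1 ≤ 48 * 2 ^ j
      · have := ih q1 hq1M
        push_cast at this ⊢
        omega
      · have h3q : 3 ≤ q1 := by omega
        obtain ⟨q2, hq2, hd2⟩ := redstep q1 h3q
        have ht2 : t ≤ 2 * (48 * 2 ^ j) := by
          have : 48 * 2 ^ (j + 1) = 2 * (48 * 2 ^ j) := by ring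
          omega
        have hq2M : q2 ≤ 48 * 2 ^ j := by omega
        have := ih q2 hq2M
        push_cast at this ⊢
        omega

lemma dval_lt_INF (t : Nat) (h : t ≤ 2 ^ 33) : Dval t + 1 ≤ pvINF := by
  have h48 : t ≤ 48 * 2 ^ 28 := by
    have : (2 : Nat) ^ 33 ≤ 48 * 2 ^ 28 := by norm_num
    omega
  have := bound_pow 28 t h48
  unfold pvINF
  norm_num at this ⊢
  omega

-- getD through map ∘ range
lemma getD_map_range (f : Nat → Int) (L t : Nat) (h : t < L) :
    (((List.range L).map f).getD t 0) = f t := by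
  rw [List.getD_eq_getElem _ _ (by simpa using h)]
  simp

-- getD through set
lemma getD_set' (xs : List Int) (u t : Nat) (v : Int) (hu : u < xs.length) :
    ((xs.set u v).getD t 0) = if t = u then v else xs.getD t 0 := by
  by_cases h : t = u
  · subst h
    rw [List.getD_eq_getElem _ _ (by simpa using hu)]
    simp [List.getElem_set_self]
  · simp only [if_neg h]
    by_cases ht : t < xs.length
    · rw [List.getD_eq_getElem _ _ (by simpa using ht),
          List.getD_eq_getElem _ _ (by simpa using ht)]
      rw [List.getElem_set_ne (by omega)]
    · rw [List.getD_eq_default _ _ (by simpa using ht),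
          List.getD_eq_default _ _ (by simpa using ht)]

-- ---------- B characterisation ----------

lemma stepB_char (m : Nat) :
    stepB ((List.range (m + 1)).map Dval) ((m : Int) + 1) =
      (List.range (m + 1 + 1)).map Dval := by
  have hmod : PySem.Int.mod ((m : Int) + 1) 3 = (((m + 1) % 3 : Nat) : Int) := by
    have := PySem.Int.mod_natCast (m + 1) 3
    push_cast at this ⊢
    omega
  have hdiv : PySem.Int.floordiv ((m : Int) + 1) 3 = (((m + 1) / 3 : Nat) : Int) := by
    have := PySem.Int.floordiv_natCast (m + 1) 3
    push_cast at this ⊢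
    omega
  have hread : PySem.List.pyGetD ((List.range (m + 1)).map Dval) ((m : Int) + 1 - 1) 0 = Dval m := by
    have he : (m : Int) + 1 - 1 = ((m : Nat) : Int) := by omega
    rw [he, PySem.List.pyGetD_natCast]
    exact getD_map_range Dval (m + 1) m (by omega)
  have hP : 2 * PySem.Int.floordiv ((m : Int) + 1) 3 + PySem.Int.mod ((m : Int) + 1) 3 =
      ((2 * ((m + 1) / 3) + (m + 1) % 3 : Nat) : Int) := by
    rw [hdiv, hmod]; push_cast; ring
  simp only [stepB]
  rw [show List.range (m + 1 + 1) = List.range (m + 1) ++ [m + 1] from List.range_succ,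
      List.map_append]
  congr 1
  rw [hread, hP, hmod]
  simp only [List.map_cons, List.map_nil]
  congr 1
  by_cases hc : (m + 1) % 3 = 2
  · rw [if_neg (by exact_mod_cast by omega : ¬ (((m + 1) % 3 : Nat) : Int) ≠ 2)]
    rw [Dval, dif_neg (by omega)]
  · rw [if_pos (by exact_mod_cast by omega : (((m + 1) % 3 : Nat) : Int) ≠ 2)]
    by_cases hlt : 2 * ((m + 1) / 3) + (m + 1) % 3 < m + 1
    · rw [if_pos (by push_cast; omega), PySem.List.pyGetD_natCast,
          getD_map_range Dval (m + 1) _ hlt, Dval, dif_pos ⟨hc, hlt⟩]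
    · rw [if_neg (by push_cast; omega), Dval, dif_neg (by omega)]

lemma B_char (m : Nat) (k : Int) :
    climb_stair_for_kimbap_heaven_alt (m : Int) k = (List.range (m + 1)).map Dval := by
  unfold climb_stair_for_kimbap_heaven_alt
  induction m with
  | zero =>
    rw [show ((0 : Nat) : Int) + 1 = 1 by norm_num, PySem.List.pyRange_one_eq_nil (by omega)]
    simp [Dval]
  | succ m ih =>
    have hsplit : PySem.List.pyRange 1 ((m : Int) + 1 + 1) 1 =
        PySem.List.pyRange 1 ((m : Int) + 1) 1 ++ [(m : Int) + 1] :=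
      PySem.List.pyRange_one_succ_right (by omega)
    push_cast
    rw [hsplit, List.foldl_append]
    push_cast at ih
    rw [ih]
    simpa using stepB_char m

-- ---------- A characterisation ----------

-- expected array contents after the first `kd` iterations of A's sweep
def Ex (kd t : Nat) : Int :=
  if t = 0 then 0
  else if t ≤ kd then Dval t
  else if t % 3 ≠ 2 ∧ 2 * (t / 3) + t % 3 < kd then Dval (2 * (t / 3) + t % 3) + 1
  else pvINF

lemma dval_succ_eq (m : Nat) :
    Dval (m + 1) =
      if (m + 1) % 3 ≠ 2 ∧ 2 * ((m + 1) / 3) + (m + 1) % 3 < m + 1 then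
        min (Dval m + 1) (Dval (2 * ((m + 1) / 3) + (m + 1) % 3) + 1)
      else Dval m + 1 := by
  rw [Dval]
  split <;> rfl

lemma ex_le (kd t : Nat) (h : t ≤ kd) : Ex kd t = Dval t := by
  unfold Ex
  by_cases h0 : t = 0
  · subst h0; simp [Dval]
  · rw [if_neg h0, if_pos h]

lemma ex_above (kd t : Nat) (h : kd < t) :
    Ex kd t =
      if t % 3 ≠ 2 ∧ 2 * (t / 3) + t % 3 < kd then Dval (2 * (t / 3) + t % 3) + 1
      else pvINF := by
  unfold Ex
  rw [if_neg (by omega), if_neg (by omega)]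

lemma ex_stable (kd t : Nat) (h1 : t ≠ kd + 1)
    (h2 : ¬(1 ≤ t ∧ t % 3 ≠ 2 ∧ 2 * (t / 3) + t % 3 = kd)) :
    Ex (kd + 1) t = Ex kd t := by
  unfold Ex
  by_cases h0 : t = 0
  · simp [h0]
  · rw [if_neg h0, if_neg h0]
    by_cases hle : t ≤ kd
    · rw [if_pos (by omega), if_pos hle]
    · rw [if_neg (by omega), if_neg hle]
      by_cases hcl : t % 3 ≠ 2 ∧ 2 * (t / 3) + t % 3 < kd
      · rw [if_pos ⟨hcl.1, by omega⟩, if_pos hcl]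
      · have hno : ¬(t % 3 ≠ 2 ∧ 2 * (t / 3) + t % 3 < kd + 1) := by
          rintro ⟨a, b⟩
          have hne : 2 * (t / 3) + t % 3 ≠ kd := fun he => h2 ⟨by omega, a, he⟩
          exact hcl ⟨a, by omega⟩
        rw [if_neg hno, if_neg hcl]

-- t is the teleport target of iteration kd iff its teleport predecessor is kd
lemma u2_iff (kd t : Nat) (ht : 1 ≤ t) :
    (t % 3 ≠ 2 ∧ 2 * (t / 3) + t % 3 = kd) ↔ t = kd + kd / 2 := by omega

lemma v1_eq (kd : Nat) (hkd : kd + 1 ≤ 2 ^ 33)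
    (hnot : ¬((kd + 1) % 3 ≠ 2 ∧ 2 * ((kd + 1) / 3) + (kd + 1) % 3 = kd)) :
    min (Ex kd (kd + 1)) (Dval kd + 1) = Dval (kd + 1) := by
  have hINF := dval_lt_INF kd (by omega)
  rw [ex_above kd (kd + 1) (by omega), dval_succ_eq]
  by_cases hc : (kd + 1) % 3 ≠ 2 ∧ 2 * ((kd + 1) / 3) + (kd + 1) % 3 < kd + 1
  · have hplt : 2 * ((kd + 1) / 3) + (kd + 1) % 3 < kd := by
      rcases hc with ⟨a, b⟩
      have : 2 * ((kd + 1) / 3) + (kd + 1) % 3 ≠ kd := fun he => hnot ⟨a, he⟩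
      omega
    rw [if_pos ⟨hc.1, hplt⟩, if_pos hc]
    exact min_comm _ _
  · have hno : ¬((kd + 1) % 3 ≠ 2 ∧ 2 * ((kd + 1) / 3) + (kd + 1) % 3 < kd) := by
      rintro ⟨a, b⟩; exact hc ⟨a, by omega⟩
    rw [if_neg hno, if_neg hc]
    exact min_eq_right (by omega)

lemma v1_eq' (kd : Nat) (hkd : kd + 1 ≤ 2 ^ 33)
    (hc : (kd + 1) % 3 ≠ 2 ∧ 2 * ((kd + 1) / 3) + (kd + 1) % 3 = kd) :
    min (Ex kd (kd + 1)) (Dval kd + 1) = Dval kd + 1 ∧ Dval (kd + 1) = Dval kd + 1 := by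
  have hINF := dval_lt_INF kd (by omega)
  constructor
  · rw [ex_above kd (kd + 1) (by omega), if_neg (by rintro ⟨a, b⟩; omega)]
    exact min_eq_right (by omega)
  · rw [dval_succ_eq, if_pos ⟨hc.1, by omega⟩, hc.2]
    exact min_self _

lemma stepA_char (N kd : Nat) (hkd : kd ≤ N) (hN : N ≤ 2 ^ 32) (s : List Int)
    (hlen : s.length = N + 1) (hval : ∀ t, t ≤ N → s.getD t 0 = Ex kd t) :
    (stepA (N : Int) s (kd : Int)).length = N + 1 ∧
      ∀ t, t ≤ N → (stepA (N : Int) s (kd : Int)).getD t 0 = Ex (kd + 1) t := by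
  have hkd32 : kd + 1 ≤ 2 ^ 33 := by omega
  have hi1 : (kd : Int) + 1 = ((kd + 1 : Nat) : Int) := by push_cast; ring
  have htel : (kd : Int) + PySem.Int.floordiv (kd : Int) 2 = ((kd + kd / 2 : Nat) : Int) := by
    have := PySem.Int.floordiv_natCast kd 2
    push_cast at this ⊢
    omega
  have hselfv : s.getD kd 0 = Dval kd := by
    rw [hval kd hkd]
    exact (ex_le kd kd (le_refl _))
  simp only [stepA, hi1, htel, PySem.List.pySetD_natCast, PySem.List.pyGetD_natCast]
  split_ifs with hT hS hS
  · -- both updates (teleport in range, step in range)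
    have hS' : kd + 1 ≤ N := by exact_mod_cast hS
    have hT' : kd + kd / 2 ≤ N := by exact_mod_cast hT
    refine ⟨by simp [hlen], ?_⟩
    intro t ht
    have hu1len : kd + 1 < s.length := by omega
    have hg1 : ∀ (t' : Nat) (v : Int),
        (s.set (kd + 1) v).getD t' 0 = if t' = kd + 1 then v else s.getD t' 0 :=
      fun t' v => getD_set' s (kd + 1) t' v hu1len
    rw [getD_set' _ _ _ _ (by simp [hlen]; omega)]
    simp only [hg1]
    rw [if_neg (show ¬ kd = kd + 1 by omega), hselfv, hval (kd + 1) hS']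
    by_cases htu : t = kd + kd / 2
    · rw [if_pos htu]
      subst htu
      by_cases h0 : kd + kd / 2 = 0
      · have hkd0 : kd = 0 := by omega
        subst hkd0
        rw [if_neg (by omega), hval 0 (by omega), ex_le 0 0 (le_refl _),
            ex_le 1 0 (by omega)]
        simp [Dval]
      · have hu2c : (kd + kd / 2) % 3 ≠ 2 ∧
            2 * ((kd + kd / 2) / 3) + (kd + kd / 2) % 3 = kd :=
          (u2_iff kd (kd + kd / 2) (by omega)).mpr rfl
        by_cases heq : kd + kd / 2 = kd + 1
        · rw [if_pos heq]
          have hv1 := v1_eq' kd hkd32 (by rw [heq] at hu2c; exact hu2c)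
          rw [hv1.1, heq, ex_le (kd + 1) (kd + 1) (le_refl _), hv1.2]
          exact min_self _
        · rw [if_neg heq]
          by_cases hle : kd + kd / 2 ≤ kd
          · have hu2kd : kd + kd / 2 = kd := by omega
            rw [hval _ (by omega), hu2kd, ex_le kd kd (le_refl _),
                ex_le (kd + 1) kd (by omega)]
            exact min_eq_left (by omega)
          · have hgt : kd + 1 < kd + kd / 2 := by omega
            rw [hval _ hT', ex_above kd _ (by omega),
                if_neg (by rintro ⟨a, b⟩; omega),
                ex_above (kd + 1) _ (by omega),
                if_pos ⟨hu2c.1, by omega⟩, hu2c.2]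
            have hINF := dval_lt_INF kd (by omega)
            exact min_eq_right (by omega)
    · rw [if_neg htu]
      by_cases ht1 : t = kd + 1
      · subst ht1
        rw [if_pos rfl, ex_le (kd + 1) (kd + 1) (le_refl _)]
        apply v1_eq kd hkd32
        intro hcc
        exact htu ((u2_iff kd (kd + 1) (by omega)).mp hcc)
      · rw [if_neg ht1, hval t ht]
        exact (ex_stable kd t ht1 (by
          rintro ⟨a, b, c⟩
          exact htu ((u2_iff kd t a).mp ⟨b, c⟩))).symm
  · -- only teleport update (kd = N, step out of range)
    have hT' : kd + kd / 2 ≤ N := by exact_mod_cast hT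
    have hS' : ¬ (kd + 1 ≤ N) := by
      intro h; exact hS (by exact_mod_cast h)
    refine ⟨by simp [hlen], ?_⟩
    intro t ht
    rw [getD_set' s (kd + kd / 2) t _ (by omega), hselfv]
    by_cases htu : t = kd + kd / 2
    · rw [if_pos htu]
      subst htu
      -- kd + kd/2 ≤ N = kd forces kd ≤ 1, so the target is kd itself
      have hu2kd : kd + kd / 2 = kd := by omega
      rw [hval _ (by omega), hu2kd, ex_le kd kd (le_refl _), ex_le (kd + 1) kd (by omega)]
      exact min_eq_left (by omega)
    · rw [if_neg htu, hval t ht]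
      exact (ex_stable kd t (by omega) (by
        rintro ⟨a, b, c⟩
        exact htu ((u2_iff kd t a).mp ⟨b, c⟩))).symm
  · -- only step update (teleport out of range)
    have hS' : kd + 1 ≤ N := by exact_mod_cast hS
    have hT' : ¬ (kd + kd / 2 ≤ N) := by
      intro h; exact hT (by exact_mod_cast h)
    refine ⟨by simp [hlen], ?_⟩
    intro t ht
    rw [getD_set' s (kd + 1) t _ (by omega), hselfv, hval (kd + 1) hS']
    by_cases ht1 : t = kd + 1
    · subst ht1
      rw [if_pos rfl, ex_le (kd + 1) (kd + 1) (le_refl _)]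
      apply v1_eq kd hkd32
      intro hcc
      have := (u2_iff kd (kd + 1) (by omega)).mp hcc
      omega
    · rw [if_neg ht1, hval t ht]
      exact (ex_stable kd t ht1 (by
        rintro ⟨a, b, c⟩
        have := (u2_iff kd t a).mp ⟨b, c⟩
        omega)).symm
  · -- no update (kd = N and teleport out of range)
    have hS' : ¬ (kd + 1 ≤ N) := by
      intro h; exact hS (by exact_mod_cast h)
    have hT' : ¬ (kd + kd / 2 ≤ N) := by
      intro h; exact hT (by exact_mod_cast h)
    refine ⟨hlen, ?_⟩
    intro t ht
    rw [hval t ht]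
    exact (ex_stable kd t (by omega) (by
      rintro ⟨a, b, c⟩
      have := (u2_iff kd t a).mp ⟨b, c⟩
      omega)).symm

lemma A_inv (N : Nat) (hN : N ≤ 2 ^ 32) :
    ∀ kd, kd ≤ N + 1 →
      (((PySem.List.pyRange 0 (kd : Int) 1).foldl (stepA (N : Int))
          (PySem.List.pySetD (List.replicate (N + 1) pvINF) 0 0)).length = N + 1 ∧
       ∀ t, t ≤ N →
        ((PySem.List.pyRange 0 (kd : Int) 1).foldl (stepA (N : Int))
          (PySem.List.pySetD (List.replicate (N + 1) pvINF) 0 0)).getD t 0 = Ex kd t) := by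
  have hdp0 : PySem.List.pySetD (List.replicate (N + 1) pvINF) 0 0 =
      (List.replicate (N + 1) pvINF).set 0 0 := by
    have : (0 : Int) = ((0 : Nat) : Int) := by norm_num
    rw [this, PySem.List.pySetD_natCast]
  intro kd
  induction kd with
  | zero =>
    intro _
    rw [show ((0 : Nat) : Int) = 0 by norm_num, PySem.List.pyRange_one_eq_nil (by omega)]
    simp only [List.foldl_nil, hdp0]
    constructor
    · simp
    · intro t ht
      rw [getD_set' _ _ _ _ (by simp)]
      unfold Ex
      by_cases h0 : t = 0
      · rw [if_pos h0, if_pos h0]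
      · rw [if_neg h0, if_neg h0, if_neg (by omega), if_neg (by rintro ⟨a, b⟩; omega)]
        rw [List.getD_eq_getElem _ _ (by simp; omega)]
        simp
  | succ kd ih =>
    intro hle
    have hkdN : kd ≤ N := by omega
    obtain ⟨hlen, hval⟩ := ih (by omega)
    have hsplit : PySem.List.pyRange 0 ((kd + 1 : Nat) : Int) 1 =
        PySem.List.pyRange 0 (kd : Int) 1 ++ [(kd : Int)] := by
      have : ((kd + 1 : Nat) : Int) = (kd : Int) + 1 := by push_cast; ring
      rw [this]
      exact PySem.List.pyRange_one_succ_right (by omega)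
    rw [hsplit, List.foldl_append, List.foldl_cons, List.foldl_nil]
    exact stepA_char N kd hkdN hN _ hlen hval

lemma A_char (N : Nat) (hN : N ≤ 2 ^ 32) (k : Int) :
    climb_stair_for_kimbap_heaven (N : Int) k = (List.range (N + 1)).map Dval := by
  unfold climb_stair_for_kimbap_heaven
  have htn : ((N : Int) + 1).toNat = N + 1 := by omega
  rw [htn]
  obtain ⟨hlen, hval⟩ := A_inv N hN (N + 1) (le_refl _)
  push_cast at hlen hval ⊢
  apply List.ext_getElem
  · simpa using hlen
  · intro i h1 h2
    have hiN : i ≤ N := by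
      rw [hlen] at h1; omega
    have := hval i hiN
    rw [List.getD_eq_getElem _ _ h1] at this
    rw [this]
    have : Ex (N + 1) i = Dval i := by
      unfold Ex
      by_cases h0 : i = 0
      · subst h0; simp [Dval]
      · rw [if_neg h0, if_pos (by omega)]
    rw [this]
    rw [List.getElem_map, List.getElem_range]

-- ===== VERDICT (by name: the statement is the Claim_ definition above) =====
theorem climb_stair_for_kimbap_heaven_spec : Claim_equal_climb_stair_for_kimbap_heaven := by
  intro n k hdom hpre
  unfold Spec_climb_stair_for_kimbap_heaven
  unfold Pre_climb_stair_for_kimbap_heaven at hpre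
  unfold Dom_climb_stair_for_kimbap_heaven at hdom
  simp only [pvDomInt, Bool.and_eq_true, decide_eq_true_eq] at hdom
  obtain ⟨⟨h1, h2⟩, -⟩ := hdom
  have hn : n = (n.toNat : Int) := (Int.toNat_of_nonneg hpre).symm
  have hN : n.toNat ≤ 2 ^ 32 := by omega
  rw [hn, A_char n.toNat hN k, B_char n.toNat k]
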